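-- pv_equiv track=rewrite | github.com/adfio1234/Algorithms | SWEA/D3/20551. 증가하는 사탕 수열/증가하는 사탕 수열.py | eatCandy
-- ===== SOURCE A (Python) =====
-- def eatCandy(A,B,C):
--     result=0
--     if C<=2:
--         return -1
--     while B>=C:
--         result+=1
--         B-=1
--     while A>=B :
--         result+=1
--         A-=1
--     if A<1 or B<1 or C<1:
--         return -1
--     return result
-- ===== SOURCE B (Python) =====
-- def eatCandy(A, B, C):
--     if C <= 2:
--         return -1
--     b = min(B, C - 1)
--     a = min(A, b - 1)
--     if a < 1 or b < 1:
--         return -1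
--     return (B - b) + (A - a)
-- ===== Notes on version B (the rewrite author's own statement) =====
-- stated objective: faster
-- what changed: Replaced the two counting decrement loops by closed-form arithmetic: the final values are min-expressions and the count is the sum of the two clamped distances.
import Mathlib
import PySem

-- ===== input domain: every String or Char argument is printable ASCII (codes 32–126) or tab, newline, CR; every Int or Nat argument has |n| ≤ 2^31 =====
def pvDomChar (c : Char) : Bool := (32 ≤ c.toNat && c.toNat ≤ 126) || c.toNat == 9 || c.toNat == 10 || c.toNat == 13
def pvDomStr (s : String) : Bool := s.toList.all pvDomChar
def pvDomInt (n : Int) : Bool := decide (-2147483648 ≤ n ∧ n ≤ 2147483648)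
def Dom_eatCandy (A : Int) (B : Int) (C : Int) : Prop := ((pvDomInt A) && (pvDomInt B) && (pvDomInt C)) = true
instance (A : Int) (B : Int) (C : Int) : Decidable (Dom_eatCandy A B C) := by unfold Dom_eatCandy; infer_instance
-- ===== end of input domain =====

-- B replaces A's two counting decrement loops by closed-form min/max arithmetic (O(1) instead of O(A+B)).
-- ===== PORT A =====
-- `while B >= C: result += 1; B -= 1`
def eatCandyLoop1 (B : Int) (C : Int) (result : Int) : Int × Int :=
  if B ≥ C then eatCandyLoop1 (B - 1) C (result + 1) else (B, result)
termination_by (B - C + 1).toNat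
decreasing_by omega

-- `while A >= B: result += 1; A -= 1`
def eatCandyLoop2 (A : Int) (B : Int) (result : Int) : Int × Int :=
  if A ≥ B then eatCandyLoop2 (A - 1) B (result + 1) else (A, result)
termination_by (A - B + 1).toNat
decreasing_by omega

def eatCandy (A : Int) (B : Int) (C : Int) : Int :=
  if C ≤ 2 then -1
  else
    let p1 := eatCandyLoop1 B C 0
    let p2 := eatCandyLoop2 A p1.1 p1.2
    if p2.1 < 1 ∨ p1.1 < 1 ∨ C < 1 then -1 else p2.2

-- ===== PORT B =====
def eatCandy_alt (A : Int) (B : Int) (C : Int) : Int :=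
  if C ≤ 2 then -1
  else
    let b := min B (C - 1)
    let a := min A (b - 1)
    if a < 1 ∨ b < 1 then -1 else (B - b) + (A - a)

-- ===== PRECONDITION & SPEC =====
def Spec_eatCandy (A : Int) (B : Int) (C : Int) (out : Int) : Prop := out = eatCandy_alt A B C
instance (A : Int) (B : Int) (C : Int) (out : Int) : Decidable (Spec_eatCandy A B C out) := by unfold Spec_eatCandy; infer_instance

-- ===== CLAIM (what is proved, stated in full; the proofs are below) =====
def Claim_equal_eatCandy : Prop := ∀ (A : Int) (B : Int) (C : Int), Dom_eatCandy A B C → Spec_eatCandy A B C (eatCandy A B C)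

-- ===== LEMMAS AND PROOFS =====

-- ===== VERDICT (by name: the statement is the Claim_ definition above) =====
theorem eatCandyLoop1_eq (B C result : Int) :
    eatCandyLoop1 B C result = (min B (C - 1), result + max (B - C + 1) 0) := by
  by_cases h : B ≥ C
  · rw [eatCandyLoop1, if_pos h, eatCandyLoop1_eq]
    simp only [Prod.mk.injEq]; constructor <;> omega
  · rw [eatCandyLoop1, if_neg h]
    simp only [Prod.mk.injEq]; constructor <;> omega
termination_by (B - C + 1).toNat
decreasing_by omega

theorem eatCandyLoop2_eq (A B result : Int) :
    eatCandyLoop2 A B result = (min A (B - 1), result + max (A - B + 1) 0) := by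
  by_cases h : A ≥ B
  · rw [eatCandyLoop2, if_pos h, eatCandyLoop2_eq]
    simp only [Prod.mk.injEq]; constructor <;> omega
  · rw [eatCandyLoop2, if_neg h]
    simp only [Prod.mk.injEq]; constructor <;> omega
termination_by (A - B + 1).toNat
decreasing_by omega

theorem eatCandy_spec : Claim_equal_eatCandy := by
  intro A B C _
  unfold Spec_eatCandy eatCandy eatCandy_alt
  by_cases hc : C ≤ 2
  · simp [hc]
  · simp only [hc, if_false, eatCandyLoop1_eq, eatCandyLoop2_eq]
    split_ifs <;> omega
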